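-- pv_equiv track=rewrite | github.com/Zim95/hackerrank_solutions | algorithms/implementation/easy/electronic_shop.py | getMoneySpent
-- ===== SOURCE A (Python) =====
-- def getMoneySpent(keyboards, drives, b):
--     sum_list = []
--     for keyboard in keyboards:
--         for drive in drives:
--             sum_list.append(keyboard+drive)
--
--     sum_list = sorted(sum_list)
--
--     filtered_sum_list = []
--     for sum_value in sum_list:
--         if sum_value <= b:
--             filtered_sum_list.append(sum_value)
--         else:
--             break
--
--     if len(filtered_sum_list):
--         return max(filtered_sum_list)
--     else:
--         return -1
-- ===== SOURCE B (Python) =====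
-- def getMoneySpent(keyboards, drives, b):
--     # single pass over the pairs: running max of affordable sums, no list, no sort
--     return max((k + d for k in keyboards for d in drives if k + d <= b), default=-1)
-- ===== Notes on version B (the rewrite author's own statement) =====
-- stated objective: idiomatic
-- what changed: Instead of materialising all n*m sums, sorting them and scanning the sorted list with a break, B computes the running maximum of the affordable sums in one pass with max(..., default=-1).
import Mathlib
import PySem

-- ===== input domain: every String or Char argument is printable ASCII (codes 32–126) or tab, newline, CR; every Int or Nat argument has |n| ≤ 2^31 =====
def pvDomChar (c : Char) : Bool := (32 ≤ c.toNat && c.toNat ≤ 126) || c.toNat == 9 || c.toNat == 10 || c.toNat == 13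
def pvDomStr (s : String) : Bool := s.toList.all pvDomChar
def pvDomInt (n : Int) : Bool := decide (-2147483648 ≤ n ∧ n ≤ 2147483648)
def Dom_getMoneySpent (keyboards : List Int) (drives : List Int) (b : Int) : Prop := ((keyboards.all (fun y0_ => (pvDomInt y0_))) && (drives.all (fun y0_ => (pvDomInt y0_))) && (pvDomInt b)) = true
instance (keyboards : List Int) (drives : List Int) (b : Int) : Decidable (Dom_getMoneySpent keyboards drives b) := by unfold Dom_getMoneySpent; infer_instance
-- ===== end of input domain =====

-- B replaces "build all n*m sums, sort, scan-with-break, max" by a single running-max pass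
-- over the affordable sums (objective: faster, measured; return value only — neither mutates).

-- ===== PORT A =====
def getMoneySpent (keyboards : List Int) (drives : List Int) (b : Int) : Int :=
  -- sum_list = []; for keyboard: for drive: sum_list.append(keyboard+drive)
  let sum_list : List Int :=
    keyboards.foldl (fun acc keyboard =>
      drives.foldl (fun acc drive => acc ++ [keyboard + drive]) acc) []
  -- sum_list = sorted(sum_list)
  let sum_list := PySem.List.sorted sum_list (fun x => x) false
  -- for sum_value in sum_list: append while <= b, break otherwise  (= takeWhile)
  let filtered_sum_list := sum_list.takeWhile (fun sum_value => decide (sum_value ≤ b))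
  -- if len(filtered_sum_list): return max(filtered_sum_list) else: return -1
  if filtered_sum_list.length ≠ 0 then
    (PySem.List.max? filtered_sum_list (fun x => x)).getD 0   -- guard makes max? a some; 0 never used
  else -1

-- ===== PORT B =====
def getMoneySpent_alt (keyboards : List Int) (drives : List Int) (b : Int) : Int :=
  -- max((k + d for k in keyboards for d in drives if k + d <= b), default=-1)
  PySem.List.maxD
    (keyboards.flatMap (fun k => (drives.filter (fun d => decide (k + d ≤ b))).map (fun d => k + d)))
    (fun x => x) (-1)

-- ===== PRECONDITION & SPEC =====
def Spec_getMoneySpent (keyboards : List Int) (drives : List Int) (b : Int) (out : Int) : Prop := out = getMoneySpent_alt keyboards drives b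
instance (keyboards : List Int) (drives : List Int) (b : Int) (out : Int) : Decidable (Spec_getMoneySpent keyboards drives b out) := by unfold Spec_getMoneySpent; infer_instance

-- ===== CLAIM (what is proved, stated in full; the proofs are below) =====
def Claim_equal_getMoneySpent : Prop := ∀ (keyboards : List Int) (drives : List Int) (b : Int), Dom_getMoneySpent keyboards drives b → Spec_getMoneySpent keyboards drives b (getMoneySpent keyboards drives b)

-- ===== LEMMAS AND PROOFS =====

-- on a ≤-sorted list, the scan-with-break collects exactly the elements ≤ b
theorem takeWhile_le_eq_filter_of_pairwise (b : Int) (l : List Int)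
    (h : l.Pairwise (fun a c => a ≤ c)) :
    l.takeWhile (fun s => decide (s ≤ b)) = l.filter (fun s => decide (s ≤ b)) := by
  induction l with
  | nil => rfl
  | cons x xs ih =>
    rcases List.pairwise_cons.mp h with ⟨hx, hxs⟩
    by_cases hxb : x ≤ b
    · simp [hxb, ih hxs]
    · have hnil : xs.filter (fun s => decide (s ≤ b)) = [] := by
        rw [List.filter_eq_nil_iff]
        intro y hy
        simp only [decide_eq_true_eq]
        intro hyb
        exact hxb (le_trans (hx y hy) hyb)
      simp [hxb, hnil]

-- max? with the identity key depends only on the multiset of elements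
theorem max?_id_eq_of_perm (xs ys : List Int) (h : xs.Perm ys) :
    PySem.List.max? xs (fun x => x) = PySem.List.max? ys (fun x => x) := by
  cases hx : PySem.List.max? xs (fun x => x) with
  | none =>
    have hxe : xs = [] := (PySem.List.max?_eq_none_iff xs _).mp hx
    subst hxe
    have hye : ys = [] := h.symm.eq_nil
    subst hye
    rfl
  | some m =>
    cases hy : PySem.List.max? ys (fun x => x) with
    | none =>
      have hye : ys = [] := (PySem.List.max?_eq_none_iff ys _).mp hy
      subst hye
      have hxe : xs = [] := h.eq_nil
      rw [hxe] at hx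
      simp [PySem.List.max?] at hx
    | some m' =>
      have hm : m ∈ xs := PySem.List.max?_mem hx
      have hm' : m' ∈ ys := PySem.List.max?_mem hy
      have h1 : m ≤ m' := PySem.List.max?_isMax hy m (h.mem_iff.mp hm)
      have h2 : m' ≤ m := PySem.List.max?_isMax hx m' (h.mem_iff.mpr hm')
      exact congrArg some (le_antisymm h1 h2)

theorem getMoneySpent_spec : Claim_equal_getMoneySpent := by
  intro keyboards drives b _
  unfold Spec_getMoneySpent getMoneySpent getMoneySpent_alt PySem.List.maxD
  -- the inner loop appends the row of sums for one keyboard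
  have hf : (fun (acc : List Int) (keyboard : Int) =>
        drives.foldl (fun acc drive => acc ++ [keyboard + drive]) acc)
      = (fun acc keyboard => acc ++ drives.map (fun d => keyboard + d)) := by
    funext acc keyboard
    exact PySem.List.foldl_append_singleton_eq_map _ _ _
  -- the nested loop builds the flat list of all sums
  have hsum : keyboards.foldl (fun acc keyboard =>
        drives.foldl (fun acc drive => acc ++ [keyboard + drive]) acc) []
      = keyboards.flatMap (fun k => drives.map (fun d => k + d)) := by
    rw [hf]
    simpa using PySem.List.foldl_append_eq_flatMap (fun k => drives.map (fun d => k + d)) keyboards []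
  -- B's generator list is the filter of that flat list
  have hB : keyboards.flatMap (fun k => (drives.filter (fun d => decide (k + d ≤ b))).map (fun d => k + d))
      = (keyboards.flatMap (fun k => drives.map (fun d => k + d))).filter (fun s => decide (s ≤ b)) := by
    rw [List.filter_flatMap]
    have hpt : ∀ k : Int, (drives.filter (fun d => decide (k + d ≤ b))).map (fun d => k + d)
        = (drives.map (fun d => k + d)).filter (fun s => decide (s ≤ b)) := by
      intro k
      rw [List.filter_map]
      rfl
    simp only [hpt]
  set L := keyboards.flatMap (fun k => drives.map (fun d => k + d)) with hLdef
  -- A's scan-with-break on the sorted list is the filter of the sorted list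
  have htake := takeWhile_le_eq_filter_of_pairwise b _ (PySem.List.sorted_pairwise L (fun x => x))
  -- the two filtered lists are permutations, so max? agrees
  have hperm : ((PySem.List.sorted L (fun x => x) false).filter (fun s => decide (s ≤ b))).Perm
      (L.filter (fun s => decide (s ≤ b))) :=
    (PySem.List.sorted_perm L (fun x => x) false).filter _
  have hmax := max?_id_eq_of_perm _ _ hperm
  simp only [hsum, htake, hB, hmax]
  by_cases hnil : L.filter (fun s => decide (s ≤ b)) = []
  · have h0 : (PySem.List.sorted L (fun x => x) false).filter (fun s => decide (s ≤ b)) = [] :=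
      (hnil ▸ hperm).eq_nil
    simp [h0, hnil, PySem.List.max?]
  · have hne2 : (PySem.List.sorted L (fun x => x) false).filter (fun s => decide (s ≤ b)) ≠ [] :=
      fun h0 => hnil ((h0 ▸ hperm).symm.eq_nil)
    obtain ⟨m, hm⟩ : ∃ m, PySem.List.max? (L.filter (fun s => decide (s ≤ b))) (fun x => x) = some m := by
      cases hy : PySem.List.max? (L.filter (fun s => decide (s ≤ b))) (fun x => x) with
      | none => exact absurd ((PySem.List.max?_eq_none_iff _ _).mp hy) hnil
      | some m => exact ⟨m, rfl⟩
    simp [hne2, hm, List.length_eq_zero_iff]
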